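-- pv_equiv track=rewrite | github.com/ramanathan23/trader-cockpit-app | shared/shared/_sql_splitter.py | _is_comment_only
-- ===== SOURCE A (Python) =====
-- def _is_comment_only(stmt: str) -> bool:
--     s = stmt
--     while s:
--         s = s.lstrip()
--         if not s:
--             return True
--         if s.startswith("--"):
--             nl = s.find("\n")
--             s = s[nl + 1:] if nl != -1 else ""
--         elif s.startswith("/*"):
--             end = s.find("*/", 2)
--             s = s[end + 2:] if end != -1 else ""
--         else:
--             return False
--     return True
-- ===== SOURCE B (Python) =====
-- def _is_comment_only(stmt: str) -> bool:
--     # One-pass DFA over the characters instead of lstrip/find/slice rescans.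
--     # states: 0 top-level, 1 seen '-', 2 seen '/', 3 line comment, 4 block comment, 5 block comment after '*'
--     state = 0
--     for c in stmt:
--         if state == 0:
--             if c.isspace():
--                 pass
--             elif c == '-':
--                 state = 1
--             elif c == '/':
--                 state = 2
--             else:
--                 return False
--         elif state == 1:
--             if c == '-':
--                 state = 3
--             else:
--                 return False
--         elif state == 2:
--             if c == '*':
--                 state = 4
--             else:
--                 return False
--         elif state == 3:
--             if c == '\n':
--                 state = 0
--         elif state == 4:
--             if c == '*':
--                 state = 5
--         else:
--             if c == '/':
--                 state = 0
--             elif c != '*':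
--                 state = 4
--     return state != 1 and state != 2
-- ===== Notes on version B (the rewrite author's own statement) =====
-- stated objective: alternative
-- what changed: Replaces A's while-loop of lstrip/startswith/find/slice rescans with a single left-to-right pass driven by an explicit 6-state comment automaton that never slices or re-searches the string.
import Mathlib
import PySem

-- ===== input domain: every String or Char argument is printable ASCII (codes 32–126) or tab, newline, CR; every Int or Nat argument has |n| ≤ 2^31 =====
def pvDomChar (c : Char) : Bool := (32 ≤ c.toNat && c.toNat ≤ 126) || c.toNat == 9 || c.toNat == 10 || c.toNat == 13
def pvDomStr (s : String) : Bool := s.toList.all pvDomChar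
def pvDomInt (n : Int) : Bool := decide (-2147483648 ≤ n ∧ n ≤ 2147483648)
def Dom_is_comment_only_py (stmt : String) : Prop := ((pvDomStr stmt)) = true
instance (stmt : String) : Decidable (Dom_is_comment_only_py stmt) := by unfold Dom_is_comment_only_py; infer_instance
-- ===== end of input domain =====

-- B replaces A's lstrip/find/slice rescanning loop by a single left-to-right DFA pass (objective: alternative).

-- ===== PORT A =====
-- termination helper for the while-loop: each iteration drops at least one character
theorem pvSliceLenLt (s s1 : List Char) (m : Int) (h1 : s1 ≠ []) (hle : s1.length ≤ s.length)
    (hm : 1 ≤ m) : (PySem.Chars.slice s1 (some m) none).length < s.length := by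
  rw [PySem.Chars.slice_eq_listSlice, PySem.List.slice_from s1 (by omega)]
  have h1' : 0 < s1.length := List.length_pos_iff.mpr h1
  have hm' : 1 ≤ m.toNat := by omega
  simp only [List.length_drop]
  omega

-- the while-loop of A, step for step (s = s.lstrip(); startswith; find; slice)
def aLoop (s : List Char) : Bool :=
  if hs : s = [] then true                                   -- while s:
  else
    let s1 := PySem.Chars.lstrip s                           -- s = s.lstrip()
    if h1 : s1 = [] then true                                -- if not s: return True
    else if PySem.Chars.startswith s1 ['-', '-'] then        -- s.startswith("--")
      let nl := PySem.Chars.find s1 ['\n']                   -- nl = s.find("\n")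
      if hnl : nl ≠ -1 then aLoop (PySem.Chars.slice s1 (some (nl + 1)) none)   -- s = s[nl+1:]
      else aLoop []                                          -- s = ""
    else if hsw : PySem.Chars.startswith s1 ['/', '*'] then  -- s.startswith("/*")
      let e := PySem.Chars.findFrom s1 ['*', '/'] 2          -- end = s.find("*/", 2)
      if he : e ≠ -1 then aLoop (PySem.Chars.slice s1 (some (e + 2)) none)      -- s = s[end+2:]
      else aLoop []                                          -- s = ""
    else false                                               -- return False
termination_by s.length
decreasing_by
  · show (PySem.Chars.slice s1 (some (PySem.Chars.find s1 ['\n'] + 1)) none).length < s.length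
    exact pvSliceLenLt s _ _ h1 (List.length_dropWhile_le _ _) (by
      have := PySem.Chars.neg_one_le_find s1 ['\n']; omega)
  · simpa [List.length_pos_iff] using hs
  · show (PySem.Chars.slice s1 (some (PySem.Chars.findFrom s1 ['*', '/'] 2 + 2)) none).length < s.length
    refine pvSliceLenLt s _ _ h1 (List.length_dropWhile_le _ _) ?_
    have hk : (2 : ℕ) ≤ s1.length := by
      have := (PySem.Chars.startswith_iff _ _).mp hsw
      have := this.length_le; simpa using this
    have h2 := PySem.Chars.findFrom_natCast_spec s1 ['*', '/'] 2 hk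
      (by simpa using he)
    have h21 := h2.1
    norm_cast at h21
    omega
  · simpa [List.length_pos_iff] using hs

def is_comment_only_py (stmt : String) : Bool := aLoop stmt.toList

-- ===== PORT B =====
-- the for-loop of B: an explicit automaton state folded over the characters
-- states: 0 top-level, 1 seen '-', 2 seen '/', 3 line comment, 4 block comment, 5 block comment after '*'
def dfa : Nat → List Char → Bool
  | st, [] => !(st == 1 || st == 2)                          -- return state != 1 and state != 2
  | st, c :: t =>
    if st == 0 then
      if PySem.Chars.isspace c then dfa 0 t
      else if c == '-' then dfa 1 t
      else if c == '/' then dfa 2 t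
      else false
    else if st == 1 then (if c == '-' then dfa 3 t else false)
    else if st == 2 then (if c == '*' then dfa 4 t else false)
    else if st == 3 then (if c == '\n' then dfa 0 t else dfa 3 t)
    else if st == 4 then (if c == '*' then dfa 5 t else dfa 4 t)
    else (if c == '/' then dfa 0 t else if c == '*' then dfa 5 t else dfa 4 t)

def is_comment_only_py_alt (stmt : String) : Bool := dfa 0 stmt.toList

-- ===== PRECONDITION & SPEC =====
def Spec_is_comment_only_py (stmt : String) (out : Bool) : Prop := out = is_comment_only_py_alt stmt
instance (stmt : String) (out : Bool) : Decidable (Spec_is_comment_only_py stmt out) := by unfold Spec_is_comment_only_py; infer_instance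

-- ===== CLAIM (what is proved, stated in full; the proofs are below) =====
def Claim_equal_is_comment_only_py : Prop := ∀ (stmt : String), Dom_is_comment_only_py stmt → Spec_is_comment_only_py stmt (is_comment_only_py stmt)

-- ===== LEMMAS AND PROOFS =====


-- character facts used to evaluate dfa steps
theorem pvIsspaceDash : PySem.Chars.isspace '-' = false := by decide
theorem pvIsspaceSlash : PySem.Chars.isspace '/' = false := by decide

-- dfa step characterisations
theorem dfa0_dashdash (r : List Char) : dfa 0 ('-' :: '-' :: r) = dfa 3 r := by
  simp [dfa, pvIsspaceDash]

theorem dfa0_slashstar (r : List Char) : dfa 0 ('/' :: '*' :: r) = dfa 4 r := by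
  simp [dfa, pvIsspaceSlash]

-- skipping leading whitespace does not change the verdict
theorem dfa0_lstrip (l : List Char) :
    dfa 0 (l.dropWhile PySem.Chars.isspace) = dfa 0 l := by
  induction l with
  | nil => rfl
  | cons c t ih =>
    simp only [List.dropWhile_cons]
    by_cases h : PySem.Chars.isspace c
    · simp [h, dfa, ih]
    · simp [h]

-- line-comment state: no newline means the whole rest is comment
theorem dfa3_true (l : List Char) (h : '\n' ∉ l) : dfa 3 l = true := by
  induction l with
  | nil => rfl
  | cons c t ih =>
    have hc : ¬ c = '\n' := fun hc => h (by simp [hc])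
    have ht : '\n' ∉ t := fun hm => h (by simp [hm])
    simp [dfa, hc, ih ht]

-- line-comment state: resume at the first newline
theorem dfa3_split (x y : List Char) (h : '\n' ∉ x) :
    dfa 3 (x ++ '\n' :: y) = dfa 0 y := by
  induction x with
  | nil => simp [dfa]
  | cons c t ih =>
    have hc : ¬ c = '\n' := fun hc => h (by simp [hc])
    have ht : '\n' ∉ t := fun hm => h (by simp [hm])
    simp [dfa, hc, ih ht]

-- block-comment states: no "*/" means the whole rest is comment
theorem dfa45_true (l : List Char) :
    (¬ ['*', '/'] <:+: l → dfa 4 l = true) ∧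
    (¬ ['*', '/'] <:+: ('*' :: l) → dfa 5 l = true) := by
  induction l with
  | nil => exact ⟨fun _ => rfl, fun _ => rfl⟩
  | cons c t ih =>
    refine ⟨fun h => ?_, fun h => ?_⟩
    · by_cases hc : c = '*'
      · subst hc
        simpa [dfa] using ih.2 h
      · have ht : ¬ ['*', '/'] <:+: t := fun hi => h (List.infix_cons_iff.mpr (Or.inr hi))
        simpa [dfa, hc] using ih.1 ht
    · by_cases hc : c = '/'
      · exact absurd (List.infix_cons_iff.mpr (Or.inl ⟨t, by simp [hc]⟩)) h
      · by_cases hc2 : c = '*'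
        · subst hc2
          have ht : ¬ ['*', '/'] <:+: ('*' :: t) := by
            intro hi
            rcases List.infix_cons_iff.mp hi with hp | hi'
            · rcases hp with ⟨u, hu⟩
              obtain ⟨rfl⟩ : t = '/' :: u := by simpa using hu.symm
              exact h (List.infix_cons_iff.mpr (Or.inr (List.infix_cons_iff.mpr
                (Or.inl ⟨u, rfl⟩))))
            · exact h (List.infix_cons_iff.mpr (Or.inr (List.infix_cons_iff.mpr
                (Or.inr hi'))))
          simpa [dfa] using ih.2 ht
        · have ht : ¬ ['*', '/'] <:+: t := fun hi =>
            h (List.infix_cons_iff.mpr (Or.inr (List.infix_cons_iff.mpr (Or.inr hi))))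
          simpa [dfa, hc, hc2] using ih.1 ht

-- block-comment states: resume after the FIRST "*/"
theorem dfa45_split (x y : List Char) :
    ((∀ i < x.length, ¬ ['*', '/'] <+: (x ++ '*' :: '/' :: y).drop i) →
        dfa 4 (x ++ '*' :: '/' :: y) = dfa 0 y) ∧
    ((∀ i < x.length + 1, ¬ ['*', '/'] <+: ('*' :: (x ++ '*' :: '/' :: y)).drop i) →
        dfa 5 (x ++ '*' :: '/' :: y) = dfa 0 y) := by
  induction x with
  | nil => exact ⟨fun _ => by simp [dfa], fun _ => by simp [dfa]⟩
  | cons c t ih =>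
    refine ⟨fun h => ?_, fun h => ?_⟩
    · by_cases hc : c = '*'
      · subst hc
        simp only [List.cons_append]
        have : dfa 4 ('*' :: (t ++ '*' :: '/' :: y)) = dfa 5 (t ++ '*' :: '/' :: y) := by
          simp [dfa]
        rw [this]
        exact ih.2 (fun i hi => by
          have := h i (by simp; omega)
          simpa using this)
      · simp only [List.cons_append]
        have : dfa 4 (c :: (t ++ '*' :: '/' :: y)) = dfa 4 (t ++ '*' :: '/' :: y) := by
          simp [dfa, hc]
        rw [this]
        exact ih.1 (fun i hi => by
          have := h (i + 1) (by simp; omega)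
          simpa using this)
    · by_cases hc : c = '/'
      · exfalso
        refine h 0 (by omega) ?_
        subst hc
        exact ⟨t ++ '*' :: '/' :: y, by simp⟩
      · by_cases hc2 : c = '*'
        · subst hc2
          simp only [List.cons_append]
          have : dfa 5 ('*' :: (t ++ '*' :: '/' :: y)) = dfa 5 (t ++ '*' :: '/' :: y) := by
            simp [dfa]
          rw [this]
          exact ih.2 (fun i hi => by
            have := h (i + 1) (by simp; omega)
            simpa using this)
        · simp only [List.cons_append]
          have : dfa 5 (c :: (t ++ '*' :: '/' :: y)) = dfa 4 (t ++ '*' :: '/' :: y) := by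
            simp [dfa, hc, hc2]
          rw [this]
          exact ih.1 (fun i hi => by
            have := h (i + 2) (by simp; omega)
            simpa using this)

-- the head of dropWhile fails the predicate
theorem dropWhile_head_false {p : Char → Bool} {l : List Char} {c : Char} {t : List Char}
    (h : l.dropWhile p = c :: t) : p c = false := by
  induction l with
  | nil => simp at h
  | cons a l ih =>
    rw [List.dropWhile_cons] at h
    by_cases hp : p a
    · simp [hp] at h
      exact ih h
    · simp [hp] at h
      rw [← h.1]
      simpa using hp

theorem aLoop_nil : aLoop [] = true := by rw [aLoop]; simp

-- drop two leading characters
theorem drop_two_cons (a b : Char) (r : List Char) (k : Nat) :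
    (a :: b :: r).drop (k + 2) = r.drop k := by
  simp [List.drop_succ_cons]

theorem aLoop_eq_dfa (l : List Char) : aLoop l = dfa 0 l := by
  induction hn : l.length using Nat.strong_induction_on generalizing l with
  | _ n ih =>
  subst hn
  rw [aLoop]
  by_cases hl : l = []
  · rw [dif_pos hl, hl]; rfl
  · rw [dif_neg hl]
    have hdrop : PySem.Chars.lstrip l = l.dropWhile PySem.Chars.isspace := rfl
    set s1 := PySem.Chars.lstrip l with hs1def
    have hW : dfa 0 s1 = dfa 0 l := by rw [hdrop]; exact dfa0_lstrip l
    have hlen1 : s1.length ≤ l.length := by rw [hdrop]; exact List.length_dropWhile_le _ _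
    by_cases h1 : s1 = []
    · rw [dif_pos h1]
      rw [← hW, h1]
      rfl
    · rw [dif_neg h1]
      by_cases hsw : PySem.Chars.startswith s1 ['-', '-'] = true
      · -- line comment branch
        rw [if_pos hsw]
        obtain ⟨r₀, hr₀⟩ : ∃ r, s1 = '-' :: '-' :: r := by
          rcases List.cons_prefix_iff.mp ((PySem.Chars.startswith_iff s1 ['-', '-']).mp hsw)
            with ⟨l', hl', hp2⟩
          rcases List.cons_prefix_iff.mp hp2 with ⟨l'', hl'', _⟩
          exact ⟨l'', by rw [hl', hl'']⟩
        by_cases hnl : PySem.Chars.find s1 ['\n'] = -1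
        · rw [dif_neg (by simpa using hnl)]
          rw [aLoop_nil, ← hW, hr₀, dfa0_dashdash]
          have hnin : '\n' ∉ s1 := by
            intro hm
            obtain ⟨p, q, hpq⟩ := List.append_of_mem hm
            exact (PySem.Chars.find_eq_neg_one_iff s1 ['\n']).mp hnl
              ⟨p, q, by rw [hpq]; simp⟩
          exact (dfa3_true r₀ (fun hm => hnin (by rw [hr₀]; simp [hm]))).symm
        · have hge : (0:Int) ≤ PySem.Chars.find s1 ['\n'] := by
            have := PySem.Chars.neg_one_le_find s1 ['\n']; omega
          rw [dif_pos hnl]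
          obtain ⟨hj, hmin⟩ := PySem.Chars.find_spec (s := s1) (sub := ['\n']) hge
          set j := (PySem.Chars.find s1 ['\n']).toNat with hjdef
          obtain ⟨y, hy⟩ : ∃ y, s1.drop j = '\n' :: y := by
            rcases List.cons_prefix_iff.mp hj with ⟨l', h', _⟩
            exact ⟨l', h'⟩
          have hjlt : j < s1.length := by
            by_contra hge'
            rw [List.drop_eq_nil_of_le (Nat.le_of_not_lt hge')] at hy
            simp at hy
          have hj2 : 2 ≤ j := by
            rcases Nat.lt_or_ge j 2 with hlt | hge2
            · exfalso
              interval_cases j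
              · rw [List.drop_zero, hr₀] at hy; simp at hy
              · rw [hr₀] at hy; simp at hy
            · exact hge2
          have harg : PySem.Chars.slice s1 (some (PySem.Chars.find s1 ['\n'] + 1)) none = y := by
            rw [PySem.Chars.slice_eq_listSlice, PySem.List.slice_from s1 (by omega)]
            have h1' : (PySem.Chars.find s1 ['\n'] + 1).toNat = j + 1 := by omega
            rw [h1']
            rw [show j + 1 = j + 1 from rfl, ← List.drop_drop (i := 1) (j := j), hy]
            simp
          rw [harg]
          have hylen : y.length < l.length := by
            have := congrArg List.length hy
            simp [List.length_drop] at this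
            omega
          rw [ih y.length hylen y rfl]
          rw [← hW, hr₀, dfa0_dashdash]
          -- goal : dfa 0 y = dfa 3 r₀
          have hs1drop : ∀ k : Nat, s1.drop (k + 2) = r₀.drop k := by
            intro k; rw [hr₀]; exact drop_two_cons _ _ _ k
          have hr0drop : r₀.drop (j - 2) = '\n' :: y := by
            have := hs1drop (j - 2)
            rw [show j - 2 + 2 = j by omega] at this
            rw [← this, hy]
          have hnx : '\n' ∉ r₀.take (j - 2) := by
            intro hm
            obtain ⟨i, hi, hgi⟩ := List.mem_iff_getElem.mp hm
            have hilen : i < j - 2 := by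
              have := hi; simp [List.length_take] at this; omega
            have hir : i < r₀.length := by
              have hls1 : s1.length = r₀.length + 2 := by rw [hr₀]; simp
              omega
            refine hmin (i + 2) (by omega) ?_
            rw [hs1drop i, List.drop_eq_getElem_cons hir]
            have : r₀[i] = '\n' := by rw [← hgi]; simp
            rw [this]
            exact ⟨_, rfl⟩
          conv_rhs => rw [show r₀ = r₀.take (j - 2) ++ '\n' :: y by
            conv_lhs => rw [← List.take_append_drop (j - 2) r₀]
            rw [hr0drop]]
          exact (dfa3_split _ _ hnx).symm
      · rw [if_neg hsw]
        by_cases hsw2 : PySem.Chars.startswith s1 ['/', '*'] = true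
        · -- block comment branch
          rw [dif_pos hsw2]
          obtain ⟨r₀, hr₀⟩ : ∃ r, s1 = '/' :: '*' :: r := by
            rcases List.cons_prefix_iff.mp ((PySem.Chars.startswith_iff s1 ['/', '*']).mp hsw2)
              with ⟨l', hl', hp2⟩
            rcases List.cons_prefix_iff.mp hp2 with ⟨l'', hl'', _⟩
            exact ⟨l'', by rw [hl', hl'']⟩
          have hk2 : (2 : ℕ) ≤ s1.length := by rw [hr₀]; simp
          have hEf : PySem.Chars.findFrom s1 ['*', '/'] 2 =
              if PySem.Chars.find r₀ ['*', '/'] = -1 then -1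
              else 2 + PySem.Chars.find r₀ ['*', '/'] := by
            have h := PySem.Chars.findFrom_natCast s1 ['*', '/'] 2 hk2
            have hd2 : s1.drop 2 = r₀ := by rw [hr₀]; rfl
            rw [hd2] at h
            simpa using h
          by_cases hf : PySem.Chars.find r₀ ['*', '/'] = -1
          · have he : PySem.Chars.findFrom s1 ['*', '/'] 2 = -1 := by
              rw [hEf, if_pos hf]
            rw [dif_neg (by simpa using he)]
            rw [aLoop_nil, ← hW, hr₀, dfa0_slashstar]
            exact ((dfa45_true r₀).1 ((PySem.Chars.find_eq_neg_one_iff r₀ ['*', '/']).mp hf)).symm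
          · have hge : (0:Int) ≤ PySem.Chars.find r₀ ['*', '/'] := by
              have := PySem.Chars.neg_one_le_find r₀ ['*', '/']; omega
            have he : PySem.Chars.findFrom s1 ['*', '/'] 2 =
                2 + PySem.Chars.find r₀ ['*', '/'] := by rw [hEf, if_neg hf]
            rw [dif_pos (by rw [he]; omega)]
            obtain ⟨hj, hmin⟩ := PySem.Chars.find_spec (s := r₀) (sub := ['*', '/']) hge
            set j := (PySem.Chars.find r₀ ['*', '/']).toNat with hjdef
            obtain ⟨y, hy⟩ : ∃ y, r₀.drop j = '*' :: '/' :: y := by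
              rcases List.cons_prefix_iff.mp hj with ⟨l', h', hp2⟩
              rcases List.cons_prefix_iff.mp hp2 with ⟨l'', h'', _⟩
              exact ⟨l'', by rw [h', h'']⟩
            have hjlt : j < r₀.length := by
              by_contra hge'
              rw [List.drop_eq_nil_of_le (Nat.le_of_not_lt hge')] at hy
              simp at hy
            have harg : PySem.Chars.slice s1
                (some (PySem.Chars.findFrom s1 ['*', '/'] 2 + 2)) none = y := by
              rw [PySem.Chars.slice_eq_listSlice, he,
                PySem.List.slice_from s1 (by omega)]
              have h1' : (2 + PySem.Chars.find r₀ ['*', '/'] + 2).toNat = j + 2 + 2 := by omega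
              rw [h1']
              rw [show j + 2 + 2 = j + 2 + 2 from rfl]
              have : s1.drop (j + 2 + 2) = r₀.drop (j + 2) := by
                rw [hr₀]; exact drop_two_cons _ _ _ (j + 2)
              rw [this, ← List.drop_drop (i := 2) (j := j), hy]
              simp
            rw [harg]
            have hylen : y.length < l.length := by
              have := congrArg List.length hy
              simp [List.length_drop] at this
              have hls1 : s1.length = r₀.length + 2 := by rw [hr₀]; simp
              omega
            rw [ih y.length hylen y rfl]
            rw [← hW, hr₀, dfa0_slashstar]
            -- goal : dfa 0 y = dfa 4 r₀
            have hdecomp : r₀ = r₀.take j ++ '*' :: '/' :: y := by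
              conv_lhs => rw [← List.take_append_drop j r₀]
              rw [hy]
            have hmin' : ∀ i < (r₀.take j).length,
                ¬ ['*', '/'] <+: ((r₀.take j ++ '*' :: '/' :: y).drop i) := by
              intro i hi
              rw [List.length_take] at hi
              rw [← hdecomp]
              exact hmin i (Nat.lt_of_lt_of_le hi (min_le_left _ _))
            conv_rhs => rw [hdecomp]
            exact ((dfa45_split (r₀.take j) y).1 hmin').symm
        · -- code: return False
          rw [dif_neg hsw2]
          rw [← hW]
          obtain ⟨c, t, hct⟩ : ∃ c t, s1 = c :: t := by
            cases hs : s1 with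
            | nil => exact absurd hs h1
            | cons c t => exact ⟨c, t, rfl⟩
          have hc : PySem.Chars.isspace c = false :=
            dropWhile_head_false (p := PySem.Chars.isspace) (by rw [← hdrop, ← hct])
          rw [hct]
          by_cases hcd : c = '-'
          · subst hcd
            cases t with
            | nil => simp [dfa, hc]
            | cons d t' =>
              have hd : ¬ d = '-' := by
                intro hdd
                exact hsw ((PySem.Chars.startswith_iff _ _).mpr
                  (by rw [hct, hdd]; exact ⟨t', rfl⟩))
              simp [dfa, hc, hd]
          · by_cases hcs : c = '/'
            · subst hcs
              cases t with
              | nil => simp [dfa, hc]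
              | cons d t' =>
                have hd : ¬ d = '*' := by
                  intro hdd
                  exact hsw2 ((PySem.Chars.startswith_iff _ _).mpr
                    (by rw [hct, hdd]; exact ⟨t', rfl⟩))
                simp [dfa, hc, hd]
            · simp [dfa, hc, hcd, hcs]

-- ===== VERDICT (by name: the statement is the Claim_ definition above) =====
theorem is_comment_only_py_spec : Claim_equal_is_comment_only_py := by
  intro stmt _
  unfold Spec_is_comment_only_py is_comment_only_py is_comment_only_py_alt
  exact aLoop_eq_dfa stmt.toList
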